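-- pv_equiv track=rewrite | github.com/joseantonio-nn/TFG-shapley-explainer | code/explaining_treeshap_explainer.py | __prepare_orderings
-- ===== SOURCE A (Python) =====
-- def __prepare_orderings(all_orderings):
--
--     acc_elements = []
--     current_ordering = []
--     total = []
--
--     for ordering in all_orderings:
--         for element in ordering:
--             current_ordering.append(acc_elements + [element])
--             acc_elements.append(element)
--
--         acc_elements.clear()
--         total += [current_ordering.copy()]
--         current_ordering.clear()
--
--     return total
-- ===== SOURCE B (Python) =====
-- def __prepare_orderings(all_orderings):
--     return [[ordering[:i] for i in range(1, len(ordering) + 1)]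
--             for ordering in all_orderings]
-- ===== Notes on version B (the rewrite author's own statement) =====
-- stated objective: simpler
-- what changed: Replaces A's three shared mutable buffers and running accumulator with a stateless comprehension that computes each prefix independently by index-based slicing ordering[:i].
import Mathlib
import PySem

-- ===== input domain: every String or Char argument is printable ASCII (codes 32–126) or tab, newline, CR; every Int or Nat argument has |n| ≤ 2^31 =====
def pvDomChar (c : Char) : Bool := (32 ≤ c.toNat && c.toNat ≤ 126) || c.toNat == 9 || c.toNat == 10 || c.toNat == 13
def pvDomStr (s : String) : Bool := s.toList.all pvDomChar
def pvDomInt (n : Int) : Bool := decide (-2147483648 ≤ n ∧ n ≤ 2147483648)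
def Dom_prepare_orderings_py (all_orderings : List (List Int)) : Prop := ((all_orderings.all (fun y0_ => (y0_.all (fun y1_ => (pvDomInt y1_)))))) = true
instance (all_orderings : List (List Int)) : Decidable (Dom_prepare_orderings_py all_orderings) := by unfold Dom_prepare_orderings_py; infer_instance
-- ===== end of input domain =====

-- B replaces A's shared mutable buffers with a stateless comprehension slicing each prefix by index; objective: simpler.


-- ===== PORT A =====
-- state: (acc_elements, current_ordering, total); inner loop appends acc+[e] to cur, then e to acc;
-- after each ordering acc and cur are cleared and cur's snapshot is appended to total.
def stepInner (t : List Int × List (List Int)) (element : Int) : List Int × List (List Int) :=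
  (t.1 ++ [element], t.2 ++ [t.1 ++ [element]])

def stepOuter (s : List Int × List (List Int) × List (List (List Int))) (ordering : List Int) :
    List Int × List (List Int) × List (List (List Int)) :=
  let inner := ordering.foldl stepInner (s.1, s.2.1)
  (([] : List Int), ([] : List (List Int)), s.2.2 ++ [inner.2])

def prepare_orderings_py (all_orderings : List (List Int)) : List (List (List Int)) :=
  (all_orderings.foldl stepOuter
    (([] : List Int), ([] : List (List Int)), ([] : List (List (List Int))))).2.2

-- ===== PORT B =====
-- [[ordering[:i] for i in range(1, len(ordering)+1)] for ordering in all_orderings]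
def prepare_orderings_py_alt (all_orderings : List (List Int)) : List (List (List Int)) :=
  all_orderings.map (fun ordering =>
    (PySem.List.pyRange 1 ((ordering.length : Int) + 1) 1).map
      (fun i => PySem.List.slice ordering none (some i)))

-- ===== PRECONDITION & SPEC =====
def Spec_prepare_orderings_py (all_orderings : List (List Int)) (out : List (List (List Int))) : Prop := out = prepare_orderings_py_alt all_orderings
instance (all_orderings : List (List Int)) (out : List (List (List Int))) : Decidable (Spec_prepare_orderings_py all_orderings out) := by unfold Spec_prepare_orderings_py; infer_instance

-- ===== CLAIM =====
def Claim_equal_prepare_orderings_py : Prop := ∀ (all_orderings : List (List Int)), Dom_prepare_orderings_py all_orderings → Spec_prepare_orderings_py all_orderings (prepare_orderings_py all_orderings)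

-- ===== LEMMAS AND PROOFS =====

-- the list of nonempty prefixes of `o`, each prefixed by `acc`
def prefAux (acc : List Int) : List Int → List (List Int)
  | [] => []
  | e :: es => (acc ++ [e]) :: prefAux (acc ++ [e]) es

theorem innerA_eq (o : List Int) (acc : List Int) (cur : List (List Int)) :
    o.foldl stepInner (acc, cur) = (acc ++ o, cur ++ prefAux acc o) := by
  induction o generalizing acc cur with
  | nil => simp [prefAux]
  | cons e es ih => simp [List.foldl, stepInner, prefAux, ih, List.append_assoc]

theorem outer_eq (xs : List (List Int)) (total : List (List (List Int))) :
    (xs.foldl stepOuter (([] : List Int), ([] : List (List Int)), total)).2.2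
    = total ++ xs.map (fun o => prefAux [] o) := by
  induction xs generalizing total with
  | nil => simp
  | cons o os ih =>
    have h : stepOuter (([] : List Int), ([] : List (List Int)), total) o
        = (([] : List Int), ([] : List (List Int)), total ++ [prefAux [] o]) := by
      simp [stepOuter, innerA_eq]
    rw [List.foldl_cons, h, ih]
    simp

theorem prefAux_eq_takes (o acc : List Int) :
    prefAux acc o = (List.range o.length).map (fun k => acc ++ o.take (k + 1)) := by
  induction o generalizing acc with
  | nil => simp [prefAux]
  | cons e es ih =>
    simp [prefAux, List.range_succ_eq_map, ih, Function.comp, List.map_map]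

theorem slices_eq_prefAux (o : List Int) :
    (PySem.List.pyRange 1 ((o.length : Int) + 1) 1).map
      (fun i => PySem.List.slice o none (some i)) = prefAux [] o := by
  rw [prefAux_eq_takes, PySem.List.pyRange_one, List.map_map]
  have h1 : ((o.length : Int) + 1 - 1).toNat = o.length := by omega
  rw [h1]
  apply List.map_congr_left
  intro k hk
  have h2 : PySem.List.slice o none (some ((1:Int) + k)) = o.take ((1:Int) + k).toNat :=
    PySem.List.slice_to o (show (0:Int) ≤ 1 + k by positivity)
  have h3 : ((1:Int) + k).toNat = k + 1 := by omega
  simp [Function.comp, h2, h3]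

-- ===== VERDICT =====
theorem prepare_orderings_py_spec : Claim_equal_prepare_orderings_py := by
  intro xs _
  unfold Spec_prepare_orderings_py prepare_orderings_py prepare_orderings_py_alt
  rw [outer_eq]
  simp [slices_eq_prefAux]
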